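-- pv_equiv track=rewrite | github.com/haxscramper/hack | testing/python/image_tagger/src/image_tagger/gui/query_search.py | _count_args
-- ===== SOURCE A (Python) =====
-- def _count_args(inner: str) -> int:
--     """Count top-level arguments in inner text."""
--     depth = 0
--     args = 0
--     in_word = False
--     for c in inner:
--         if c == "(":
--             depth += 1
--         elif c == ")":
--             depth -= 1
--         elif depth == 0 and c not in " \t\n":
--             if not in_word:
--                 args += 1
--                 in_word = True
--         elif depth == 0 and c in " \t\n":
--             in_word = False
--     return max(0, args - 1)  # subtract 1 for function name
-- ===== SOURCE B (Python) =====
-- def _count_args(inner: str) -> int: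
--     """Count top-level arguments in inner text."""
--     # pass 1: keep only top-level (depth == 0), non-paren characters
--     depth = 0
--     top = []
--     for c in inner:
--         if c == "(":
--             depth += 1
--         elif c == ")":
--             depth -= 1
--         elif depth == 0:
--             top.append(c)
--     flat = "".join(top)
--     # pass 2: count word starts = non-separator chars whose predecessor is a separator
--     seps = " \t\n"
--     starts = sum(1 for prev, cur in zip(" " + flat, flat)
--                  if prev in seps and cur not in seps)
--     return max(0, starts - 1)
-- ===== Notes on version B (the rewrite author's own statement) =====
-- stated objective: alternative
-- what changed: Replaced A's single fused state machine (depth/args/in_word) by two independent passes: first filter out parens and non-top-level characters, then count word starts via a pairwise zip of the filtered string with itself shifted by a sentinel space.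
import Mathlib
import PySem

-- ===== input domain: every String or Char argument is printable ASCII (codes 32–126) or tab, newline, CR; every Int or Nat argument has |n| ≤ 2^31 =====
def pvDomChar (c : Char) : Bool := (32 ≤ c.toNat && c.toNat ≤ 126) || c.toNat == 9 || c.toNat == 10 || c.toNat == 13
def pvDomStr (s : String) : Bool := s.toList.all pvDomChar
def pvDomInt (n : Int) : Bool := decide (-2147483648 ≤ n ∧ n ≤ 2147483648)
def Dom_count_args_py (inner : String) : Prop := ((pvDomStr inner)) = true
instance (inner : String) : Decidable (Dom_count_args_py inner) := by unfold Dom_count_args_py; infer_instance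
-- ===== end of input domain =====

-- B replaces A's fused depth/args/in_word state machine by two passes: filter the
-- top-level non-paren characters, then count word starts pairwise; same values everywhere.

-- ===== PORT A =====
-- A's loop over the characters, carrying exactly A's state (depth, args, in_word);
-- returns the final args.
def aLoop (depth args : Int) (inWord : Bool) : List Char → Int
  | [] => args
  | c :: rest =>
    if c = '(' then aLoop (depth + 1) args inWord rest
    else if c = ')' then aLoop (depth - 1) args inWord rest
    else if depth = 0 ∧ ¬ (c = ' ' ∨ c = '\t' ∨ c = '\n') then
      (if ¬ inWord then aLoop depth (args + 1) true rest else aLoop depth args inWord rest)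
    else if depth = 0 ∧ (c = ' ' ∨ c = '\t' ∨ c = '\n') then aLoop depth args false rest
    else aLoop depth args inWord rest

def count_args_py (inner : String) : Int :=
  max 0 (aLoop 0 0 false inner.toList - 1)

-- ===== PORT B =====
-- separator test used by B (the string " \t\n" membership)
def bSep (c : Char) : Bool := c = ' ' || c = '\t' || c = '\n'

-- pass 1: keep only top-level (depth = 0) non-paren characters
def bTop (depth : Int) : List Char → List Char
  | [] => []
  | c :: rest =>
    if c = '(' then bTop (depth + 1) rest
    else if c = ')' then bTop (depth - 1) rest
    else if depth = 0 then c :: bTop depth rest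
    else bTop depth rest

def count_args_py_alt (inner : String) : Int :=
  let flat := bTop 0 inner.toList
  let starts := List.countP (fun p => bSep p.1 && !bSep p.2) (List.zip (' ' :: flat) flat)
  max 0 ((starts : Int) - 1)

-- ===== PRECONDITION & SPEC =====
def Spec_count_args_py (inner : String) (out : Int) : Prop := out = count_args_py_alt inner
instance (inner : String) (out : Int) : Decidable (Spec_count_args_py inner out) := by unfold Spec_count_args_py; infer_instance

-- ===== CLAIM (what is proved, stated in full; the proofs are below) =====
def Claim_equal_count_args_py : Prop := ∀ (inner : String), Dom_count_args_py inner → Spec_count_args_py inner (count_args_py inner)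

-- ===== LEMMAS AND PROOFS =====

-- word starts in a list, given whether the previous kept character was a non-separator
def starts (inWord : Bool) : List Char → Nat
  | [] => 0
  | c :: rest =>
    if bSep c then starts false rest
    else (if inWord then 0 else 1) + starts true rest

-- B's pairwise zip count is the `starts` machine seeded by the sentinel's class
theorem countP_zip_eq_starts (p : Char) (l : List Char) :
    List.countP (fun q => bSep q.1 && !bSep q.2) (List.zip (p :: l) l) = starts (!bSep p) l := by
  induction l generalizing p with
  | nil => simp [starts]
  | cons c rest ih =>
    simp only [List.zip_cons_cons, List.countP_cons, starts, ih c]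
    by_cases hp : bSep p <;> by_cases hc : bSep c <;> simp [hp, hc] ; omega

-- A's loop computes args plus the word starts of the filtered remainder
theorem aLoop_eq_starts (l : List Char) :
    ∀ (d args : Int) (w : Bool), aLoop d args w l = args + (starts w (bTop d l) : Int) := by
  induction l with
  | nil => intro d args w; simp [aLoop, bTop, starts]
  | cons c rest ih =>
    intro d args w
    simp only [aLoop, bTop, ih]
    split_ifs <;> simp_all [starts, bSep] <;> (try omega) <;> (intros; tauto)
-- ===== VERDICT (by name: the statement is the Claim_ definition above) =====
theorem count_args_py_spec : Claim_equal_count_args_py := by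
  intro inner _
  unfold Spec_count_args_py count_args_py count_args_py_alt
  simp only [aLoop_eq_starts, countP_zip_eq_starts]
  simp [bSep]
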